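-- pv_equiv track=rewrite | github.com/quocthang0507/Python | TestCenter-CodeSignal.py | alternatingSort
-- ===== SOURCE A (Python) =====
-- def alternatingSort(a):
--     if len(a) != len(set(a)):
--         return False
--     b = sorted(a)
--     l = len(a)
--     right = l-1
--     left = 0
--     for i in range(l):
--         if i % 2 == 0:
--             if b[i] != a[left]:
--                 return False
--             left += 1
--         else:
--             if b[i] != a[right]:
--                 return False
--             right -= 1
--     return True
-- ===== SOURCE B (Python) =====
-- def alternatingSort(a):
--     l = len(a)
--     def val(i):
--         return a[i // 2] if i % 2 == 0 else a[l - 1 - i // 2]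
--     return all(val(i - 1) < val(i) for i in range(1, l))
-- ===== Notes on version B (the rewrite author's own statement) =====
-- stated objective: faster
-- what changed: B drops A's duplicate-set and sort entirely: it reads the interleaved front/back sequence (first element, last, second, second-to-last, and so on) directly by index and checks it is strictly increasing with an early-exit all(), which also subsumes the distinctness check.
import Mathlib
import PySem

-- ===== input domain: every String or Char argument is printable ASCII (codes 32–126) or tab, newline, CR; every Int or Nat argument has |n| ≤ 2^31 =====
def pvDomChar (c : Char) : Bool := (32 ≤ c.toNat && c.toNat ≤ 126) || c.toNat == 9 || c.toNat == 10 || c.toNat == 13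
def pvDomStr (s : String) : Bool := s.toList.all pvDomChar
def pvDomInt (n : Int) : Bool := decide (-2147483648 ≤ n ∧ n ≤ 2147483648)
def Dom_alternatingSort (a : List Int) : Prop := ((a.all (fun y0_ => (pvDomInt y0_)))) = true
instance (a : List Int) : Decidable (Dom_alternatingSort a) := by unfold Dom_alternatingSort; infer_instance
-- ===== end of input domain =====

-- B drops A's duplicate-set and sort: it reads the interleaved front/back sequence (first, last, second, second-to-last, ...)
-- directly by index and checks it is strictly increasing, stopping at the first violation; same return value on every input.

-- ===== PORT A =====
-- A's for-loop with early return; Python's b[i], a[left], a[right] are always in range here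
-- (0 ≤ i,left,right < len(a) throughout), so pyGetD's default is never read and the port is exact.
def alternatingSortLoop (a b : List Int) : List Int → Int → Int → Bool
  | [], _, _ => true
  | i :: rest, left, right =>
    if PySem.Int.mod i 2 == 0 then
      if PySem.List.pyGetD b i 0 != PySem.List.pyGetD a left 0 then false
      else alternatingSortLoop a b rest (left + 1) right
    else
      if PySem.List.pyGetD b i 0 != PySem.List.pyGetD a right 0 then false
      else alternatingSortLoop a b rest left (right - 1)

def alternatingSort (a : List Int) : Bool :=
  if (a.length : Int) ≠ PySem.Set.len (PySem.Set.ofList a) then false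
  else
    let b := PySem.List.sorted a (fun x => x) false
    let l : Int := a.length
    alternatingSortLoop a b (PySem.List.pyRange 0 l 1) 0 (l - 1)

-- ===== PORT B =====
-- Source B's helper val(i); its indices i//2 and l-1-i//2 always lie in range for 0 ≤ i < l,
-- so pyGetD's default is never read and the port is exact.
def alternatingSortVal (a : List Int) (l : Int) (i : Int) : Int :=
  if PySem.Int.mod i 2 == 0 then PySem.List.pyGetD a (PySem.Int.floordiv i 2) 0
  else PySem.List.pyGetD a (l - 1 - PySem.Int.floordiv i 2) 0

def alternatingSort_alt (a : List Int) : Bool :=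
  let l : Int := a.length
  (PySem.List.pyRange 1 l 1).all (fun i =>
    decide (alternatingSortVal a l (i - 1) < alternatingSortVal a l i))

-- ===== PRECONDITION & SPEC =====
def Spec_alternatingSort (a : List Int) (out : Bool) : Prop := out = alternatingSort_alt a
instance (a : List Int) (out : Bool) : Decidable (Spec_alternatingSort a out) := by unfold Spec_alternatingSort; infer_instance

-- ===== CLAIM (what is proved, stated in full; the proofs are below) =====
def Claim_equal_alternatingSort : Prop := ∀ (a : List Int), Dom_alternatingSort a → Spec_alternatingSort a (alternatingSort a)

-- ===== LEMMAS AND PROOFS =====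

-- the interleaved sequence (front, back, front, back, …) that both programs compare against
def interleave (a : List Int) : List Int :=
  (List.range a.length).map (fun i =>
    if i % 2 = 0 then a.getD (i / 2) 0 else a.getD (a.length - 1 - i / 2) 0)

theorem length_interleave (a : List Int) : (interleave a).length = a.length := by
  simp [interleave]

theorem interleave_getD (a : List Int) (j : Nat) (hj : j < a.length) :
    (interleave a).getD j 0 =
      if j % 2 = 0 then a.getD (j / 2) 0 else a.getD (a.length - 1 - j / 2) 0 := by
  unfold interleave
  rw [List.getD_eq_getElem _ _ (by simpa using hj)]
  simp

theorem val_eq (a : List Int) (n : Nat) (hn : n < a.length) :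
    alternatingSortVal a (a.length : Int) (n : Int) = (interleave a).getD n 0 := by
  unfold alternatingSortVal
  have hmod : PySem.Int.mod (n : Int) 2 = ((n % 2 : Nat) : Int) := by
    exact_mod_cast PySem.Int.mod_natCast n 2
  have hdiv : PySem.Int.floordiv (n : Int) 2 = ((n / 2 : Nat) : Int) := by
    exact_mod_cast PySem.Int.floordiv_natCast n 2
  rw [hmod, hdiv, interleave_getD a n hn]
  by_cases hpar : n % 2 = 0
  · rw [hpar, PySem.List.pyGetD_natCast a (n / 2) 0]
    simp
  · have hpar1 : n % 2 = 1 := by omega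
    rw [hpar1]
    have hridx : ((a.length : Int) - 1 - ((n / 2 : Nat) : Int))
        = ((a.length - 1 - n / 2 : Nat) : Int) := by
      push_cast [Nat.cast_sub (by omega : 1 ≤ a.length),
        Nat.cast_sub (by omega : n / 2 ≤ a.length - 1)]
      omega
    rw [hridx, PySem.List.pyGetD_natCast a (a.length - 1 - n / 2) 0]
    simp

theorem altB_iff (a : List Int) :
    alternatingSort_alt a = true ↔ List.IsChain (· < ·) (interleave a) := by
  rw [List.isChain_iff_getElem]
  unfold alternatingSort_alt
  simp only [List.all_eq_true, decide_eq_true_eq]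
  have hlen := length_interleave a
  constructor
  · intro h i hi
    rw [hlen] at hi
    have hm : ((i + 1 : Nat) : Int) ∈ PySem.List.pyRange 1 (a.length : Int) 1 :=
      PySem.List.mem_pyRange_one.2 (by push_cast; omega)
    have hv := h _ hm
    rw [show ((i + 1 : Nat) : Int) - 1 = (i : Int) by push_cast; ring] at hv
    rw [val_eq a i (by omega), val_eq a (i + 1) (by omega)] at hv
    rwa [List.getD_eq_getElem _ _ (by omega), List.getD_eq_getElem _ _ (by omega)] at hv
  · intro h i him
    obtain ⟨h1, h2⟩ := PySem.List.mem_pyRange_one.1 him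
    obtain ⟨n, rfl⟩ : ∃ n : Nat, i = (n : Int) := ⟨i.toNat, by omega⟩
    have hn1 : 1 ≤ n := by exact_mod_cast h1
    have hn2 : n < a.length := by exact_mod_cast h2
    obtain ⟨m, rfl⟩ : ∃ m, n = m + 1 := ⟨n - 1, by omega⟩
    rw [show ((m + 1 : Nat) : Int) - 1 = (m : Int) by push_cast; ring]
    rw [val_eq a m (by omega), val_eq a (m + 1) hn2]
    have := h m (by omega)
    rwa [List.getD_eq_getElem _ _ (by omega), List.getD_eq_getElem _ _ (by omega)]

theorem getD_range_id (a : List Int) : (List.range a.length).map (fun j => a.getD j 0) = a := by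
  apply List.ext_getElem
  · simp
  · intro i h1 h2
    simp [List.getElem?_eq_getElem h2]

theorem interleave_perm (a : List Int) : (interleave a).Perm a := by
  have hperm : ((List.range a.length).map
      (fun i => if i % 2 = 0 then i / 2 else a.length - 1 - i / 2)).Perm (List.range a.length) := by
    rw [List.perm_ext_iff_of_nodup]
    · intro j
      simp only [List.mem_map, List.mem_range]
      constructor
      · rintro ⟨i, hi, rfl⟩
        split <;> omega
      · intro hj
        by_cases h2 : 2 * j < a.length
        · exact ⟨2 * j, by omega, by simp⟩
        · refine ⟨2 * (a.length - 1 - j) + 1, by omega, ?_⟩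
          rw [if_neg (by omega)]
          omega
    · apply List.Nodup.map_on _ List.nodup_range
      intro x hx y hy hxy
      simp only [List.mem_range] at hx hy
      split at hxy <;> split at hxy <;> omega
    · exact List.nodup_range
  have hiv : interleave a = ((List.range a.length).map
      (fun i => if i % 2 = 0 then i / 2 else a.length - 1 - i / 2)).map (fun j => a.getD j 0) := by
    rw [List.map_map]
    apply List.map_congr_left
    intro i _
    simp only [Function.comp]
    split <;> rfl
  have h2 := hperm.map (fun j => a.getD j 0)
  rw [getD_range_id] at h2
  rw [hiv]
  exact h2

theorem ofList_length_eq_iff (a : List Int) :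
    (PySem.Set.ofList a).length = a.length ↔ a.Nodup := by
  constructor
  · intro h
    induction a with
    | nil => simp
    | cons x xs ih =>
      rw [PySem.Set.ofList_cons] at h
      simp only [List.length_cons] at h
      by_cases hx : x ∈ xs
      · exfalso
        have hmem : x ∈ PySem.Set.ofList xs := (PySem.Set.mem_ofList xs x).2 hx
        have hlt : (PySem.Set.discard (PySem.Set.ofList xs) x).length < (PySem.Set.ofList xs).length := by
          unfold PySem.Set.discard
          rw [← List.countP_eq_length_filter]
          exact List.countP_lt_length_iff.2 ⟨x, hmem, by simp⟩
        have := PySem.Set.length_ofList_le xs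
        omega
      · have hlen : (PySem.Set.discard (PySem.Set.ofList xs) x).length = (PySem.Set.ofList xs).length := by
          unfold PySem.Set.discard
          rw [List.filter_eq_self.2]
          intro y hy
          have hyx : y ∈ xs := (PySem.Set.mem_ofList xs y).1 hy
          simp only [Bool.not_eq_true', beq_eq_false_iff_ne, ne_eq]
          exact fun he => hx (he ▸ hyx)
        rw [hlen] at h
        exact List.nodup_cons.2 ⟨hx, ih (by omega)⟩
  · intro h
    rw [PySem.Set.ofList_eq_self_of_nodup a h]

theorem loop_spec (a b : List Int) (n : Nat) :
    ∀ i : Nat, i + n = a.length →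
    (alternatingSortLoop a b (PySem.List.pyRange i a.length 1)
        (((i + 1) / 2 : Nat) : Int) ((a.length : Int) - 1 - ((i / 2 : Nat) : Int)) = true
      ↔ ∀ j : Nat, i ≤ j → j < a.length → b.getD j 0 = (interleave a).getD j 0) := by
  induction n with
  | zero =>
    intro i hi
    rw [PySem.List.pyRange_one_eq_nil (by omega)]
    simp only [alternatingSortLoop, true_iff]
    intro j h1 h2; omega
  | succ n ih =>
    intro i hi
    rw [PySem.List.pyRange_one_cons (by exact_mod_cast (by omega : (i:Int) < a.length))]
    have hcast : ((i : Int) + 1) = ((i + 1 : Nat) : Int) := by push_cast; ring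
    rw [hcast]
    simp only [alternatingSortLoop]
    have hmod : PySem.Int.mod (i : Int) 2 = ((i % 2 : Nat) : Int) :=
      by exact_mod_cast PySem.Int.mod_natCast i 2
    have hbi : PySem.List.pyGetD b (i : Int) 0 = b.getD i 0 := PySem.List.pyGetD_natCast b i 0
    have hrec := ih (i + 1) (by omega)
    by_cases hpar : i % 2 = 0
    · -- even step: Python compares b[i] with a[left], left = i/2
      rw [hmod, hpar]
      simp only [Nat.cast_zero, beq_self_eq_true, if_true, hbi]
      have hl2 : (i + 1) / 2 = i / 2 := by omega
      rw [hl2, PySem.List.pyGetD_natCast a (i / 2) 0]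
      have hL : ((i / 2 : Nat) : Int) + 1 = (((i + 1 + 1) / 2 : Nat) : Int) := by
        have h : (i + 1 + 1) / 2 = i / 2 + 1 := by omega
        rw [h]; push_cast; ring
      have hR : ((a.length : Int) - 1 - ((i / 2 : Nat) : Int))
          = ((a.length : Int) - 1 - (((i + 1) / 2 : Nat) : Int)) := by rw [hl2]
      rw [hL, hR]
      by_cases heq : b.getD i 0 = a.getD (i / 2) 0
      · rw [heq]
        simp only [bne_self_eq_false, Bool.false_eq_true, if_false]
        rw [hrec]
        constructor
        · intro h j h1 h2
          rcases Nat.eq_or_lt_of_le h1 with rfl | hlt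
          · rw [interleave_getD a i h2, if_pos hpar, heq]
          · exact h j (by omega) h2
        · intro h j h1 h2
          exact h j (by omega) h2
      · rw [if_pos (by simpa [bne_iff_ne] using heq)]
        constructor
        · intro h; simp at h
        · intro h
          exfalso
          have hh := h i (le_refl i) (by omega)
          rw [interleave_getD a i (by omega), if_pos hpar] at hh
          exact heq hh
    · -- odd step: Python compares b[i] with a[right], right = len(a) - 1 - i/2
      rw [hmod]
      have hpar1 : i % 2 = 1 := by omega
      rw [hpar1]
      simp only [Nat.cast_one, hbi]
      rw [if_neg (by decide)]
      have hridx : ((a.length : Int) - 1 - ((i / 2 : Nat) : Int))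
          = ((a.length - 1 - i / 2 : Nat) : Int) := by
        push_cast [Nat.cast_sub (by omega : 1 ≤ a.length),
          Nat.cast_sub (by omega : i / 2 ≤ a.length - 1)]
        omega
      rw [hridx, PySem.List.pyGetD_natCast a (a.length - 1 - i / 2) 0]
      have hL2 : (((i + 1) / 2 : Nat) : Int) = (((i + 1 + 1) / 2 : Nat) : Int) := by
        have h : (i + 1 + 1) / 2 = (i + 1) / 2 := by omega
        rw [h]
      have hR2 : ((a.length - 1 - i / 2 : Nat) : Int) - 1
          = ((a.length : Int) - 1 - (((i + 1) / 2 : Nat) : Int)) := by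
        have h2 : (i + 1) / 2 = i / 2 + 1 := by omega
        rw [h2]
        push_cast [Nat.cast_sub (by omega : i / 2 ≤ a.length - 1),
          Nat.cast_sub (by omega : 1 ≤ a.length)]
        omega
      rw [hL2, hR2]
      by_cases heq : b.getD i 0 = a.getD (a.length - 1 - i / 2) 0
      · rw [heq]
        simp only [bne_self_eq_false, Bool.false_eq_true, if_false]
        rw [hrec]
        constructor
        · intro h j h1 h2
          rcases Nat.eq_or_lt_of_le h1 with rfl | hlt
          · rw [interleave_getD a i h2, if_neg (by omega), heq]
          · exact h j (by omega) h2
        · intro h j h1 h2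
          exact h j (by omega) h2
      · rw [if_pos (by simpa [bne_iff_ne] using heq)]
        constructor
        · intro h; simp at h
        · intro h
          exfalso
          have hh := h i (le_refl i) (by omega)
          rw [interleave_getD a i (by omega), if_neg (by omega)] at hh
          exact heq hh

theorem altA_iff (a : List Int) :
    alternatingSort a = true ↔
      a.Nodup ∧ PySem.List.sorted a (fun x => x) false = interleave a := by
  unfold alternatingSort
  by_cases hnd : a.Nodup
  · rw [if_neg (by
      simp only [PySem.Set.len, ne_eq, not_not]
      exact_mod_cast (ofList_length_eq_iff a).2 hnd |>.symm)]
    have hspec := loop_spec a (PySem.List.sorted a (fun x => x) false) a.length 0 (by omega)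
    norm_num at hspec
    show alternatingSortLoop a (PySem.List.sorted a (fun x => x) false)
        (PySem.List.pyRange 0 (a.length : Int) 1) 0 ((a.length : Int) - 1) = true ↔ _
    rw [hspec]
    have hlen : (PySem.List.sorted a (fun x => x) false).length = a.length :=
      PySem.List.length_sorted a _ _
    constructor
    · intro h
      refine ⟨hnd, ?_⟩
      apply List.ext_getElem (by rw [hlen, length_interleave])
      intro j hj1 hj2
      have := h j (by omega)
      rwa [List.getElem?_eq_getElem hj1, List.getElem?_eq_getElem hj2] at this
    · rintro ⟨-, heq⟩
      intro j hj
      rw [heq]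
  · rw [if_pos (by
      simp only [PySem.Set.len, ne_eq]
      intro hc
      exact hnd ((ofList_length_eq_iff a).1 (by exact_mod_cast hc.symm)) )]
    simp only [Bool.false_eq_true, false_iff]
    rintro ⟨h, -⟩
    exact hnd h

theorem main_iff (a : List Int) :
    (a.Nodup ∧ PySem.List.sorted a (fun x => x) false = interleave a)
      ↔ List.IsChain (· < ·) (interleave a) := by
  constructor
  · rintro ⟨hnd, heq⟩
    rw [List.isChain_iff_pairwise, ← heq]
    have hle := PySem.List.sorted_pairwise a (fun x => x) (κ := Int)
    have hnd' : (PySem.List.sorted a (fun x => x) false).Nodup :=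
      (PySem.List.sorted_perm a (fun x => x) false).nodup_iff.2 hnd
    exact (hnd'.and hle).imp (fun h => lt_of_le_of_ne h.2 h.1)
  · intro hch
    have hpw : (interleave a).Pairwise (· < ·) := List.isChain_iff_pairwise.1 hch
    have hnd' : (interleave a).Nodup := hpw.imp ne_of_lt
    refine ⟨((interleave_perm a).nodup_iff).1 hnd', ?_⟩
    exact PySem.List.sorted_eq_of_perm_of_pairwise_lt a (interleave a) (fun x => x)
      (interleave_perm a) hpw

-- ===== VERDICT (by name: the statement is the Claim_ definition above) =====
theorem alternatingSort_spec : Claim_equal_alternatingSort := by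
  intro a _
  unfold Spec_alternatingSort
  rw [Bool.eq_iff_iff, altA_iff, altB_iff, main_iff]
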